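-- pv_equiv track=rewrite | github.com/Areebanaeem123/F-25-142D-FYP-KickSense-AI-Powered-Football-Analytics-System-python-video-analysis-vs.code | formation_analyzer.py | _get_formation_binned
-- ===== SOURCE A (Python) =====
-- def _get_formation_binned(positions):
--     """
--     Divide pitch into 3 zones and count players:
--     Defense: < 35m | Midfield: 35m-70m | Attack: > 70m
--     """
--     defense = 0
--     midfield = 0
--     attack = 0
--
--     for p in positions:
--         y = p[1] # Vertical axis (pitch length)
--         if y < 35:
--             defense += 1
--         elif y < 70:
--             midfield += 1
--         else:
--             attack += 1
--
--     return f"{defense}-{midfield}-{attack}"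
-- ===== SOURCE B (Python) =====
-- def _get_formation_binned(positions):
--     # Sort the y-coordinates once, then locate the two zone boundaries (35 and 70)
--     # by binary search: the three zone counts are the gaps between the insertion points.
--     ys = sorted(p[1] for p in positions)
--
--     def left_insertion_point(t):
--         lo, hi = 0, len(ys)
--         while lo < hi:
--             mid = (lo + hi) // 2
--             if ys[mid] < t:
--                 lo = mid + 1
--             else:
--                 hi = mid
--         return lo
--
--     i = left_insertion_point(35)
--     j = left_insertion_point(70)
--     return f"{i}-{j - i}-{len(ys) - j}"
-- ===== Notes on version B (the rewrite author's own statement) =====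
-- stated objective: alternative
-- what changed: Instead of classifying each player with an if/elif/else chain while keeping three counters, B sorts the y-coordinates once and finds the two zone boundaries (35 and 70) with a hand-written binary search; the three counts are the gaps between the insertion points.
import Mathlib
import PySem

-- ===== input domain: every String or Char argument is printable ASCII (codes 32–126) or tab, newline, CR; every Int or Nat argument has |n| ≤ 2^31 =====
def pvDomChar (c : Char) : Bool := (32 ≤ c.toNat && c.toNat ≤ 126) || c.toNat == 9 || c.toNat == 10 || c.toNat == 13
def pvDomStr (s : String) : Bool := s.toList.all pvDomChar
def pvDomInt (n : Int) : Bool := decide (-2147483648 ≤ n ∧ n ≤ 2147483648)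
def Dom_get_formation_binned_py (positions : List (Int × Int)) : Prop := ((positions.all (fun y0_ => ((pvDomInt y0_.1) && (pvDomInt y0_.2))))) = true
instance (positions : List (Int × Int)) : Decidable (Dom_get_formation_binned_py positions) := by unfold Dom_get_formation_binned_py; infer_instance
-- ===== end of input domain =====

-- B sorts the y-coordinates once and locates the two zone boundaries (35, 70) with a
-- hand-written binary search; the three counts are the gaps between the insertion
-- points (alternative algorithm, same result).

-- ===== PORT A =====
def get_formation_binned_py (positions : List (Int × Int)) : String :=
  let s := positions.foldl
    (fun (s : Int × Int × Int) p =>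
      let y := p.2
      if y < 35 then (s.1 + 1, s.2.1, s.2.2)
      else if y < 70 then (s.1, s.2.1 + 1, s.2.2)
      else (s.1, s.2.1, s.2.2 + 1))
    (0, 0, 0)
  PySem.Int.toStr s.1 ++ "-" ++ PySem.Int.toStr s.2.1 ++ "-" ++ PySem.Int.toStr s.2.2

-- ===== PORT B =====
-- B's `while lo < hi` binary-search loop, transcribed as recursion on hi - lo.
-- `ys[mid]` is ported as getD mid 0: the loop only ever reads indices with
-- lo ≤ mid < hi ≤ len(ys), where Python indexing returns the element (exact there).
def pvInsPoint (ys : List Int) (t : Int) (lo hi : Nat) : Nat :=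
  if _h : lo < hi then
    if ys.getD ((lo + hi) / 2) 0 < t then pvInsPoint ys t ((lo + hi) / 2 + 1) hi
    else pvInsPoint ys t lo ((lo + hi) / 2)
  else lo
termination_by hi - lo
decreasing_by all_goals omega

def get_formation_binned_py_alt (positions : List (Int × Int)) : String :=
  let ys := PySem.List.sorted (positions.map (fun p => p.2)) (fun y => y) false
  let i := pvInsPoint ys 35 0 ys.length
  let j := pvInsPoint ys 70 0 ys.length
  PySem.Int.toStr (i : Int) ++ "-" ++ PySem.Int.toStr ((j : Int) - (i : Int)) ++ "-" ++
    PySem.Int.toStr ((ys.length : Int) - (j : Int))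

-- ===== PRECONDITION & SPEC =====
def Spec_get_formation_binned_py (positions : List (Int × Int)) (out : String) : Prop := out = get_formation_binned_py_alt positions
instance (positions : List (Int × Int)) (out : String) : Decidable (Spec_get_formation_binned_py positions out) := by unfold Spec_get_formation_binned_py; infer_instance

-- ===== CLAIM (what is proved, stated in full; the proofs are below) =====
def Claim_equal_get_formation_binned_py : Prop := ∀ (positions : List (Int × Int)), Dom_get_formation_binned_py positions → Spec_get_formation_binned_py positions (get_formation_binned_py positions)

-- ===== LEMMAS AND PROOFS =====

-- On a sorted list, "the k-th element is < t" is exactly "k < the number of elements < t".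
theorem pv_sorted_lt_iff (t : Int) : ∀ (ys : List Int), ys.Pairwise (· ≤ ·) →
    ∀ k, k < ys.length → (ys.getD k 0 < t ↔ k < ys.countP (fun y => decide (y < t)))
  | [], _, k, hk => absurd hk (by simp)
  | y :: r, hs, k, hk => by
    rw [List.pairwise_cons] at hs
    obtain ⟨h1, h2⟩ := hs
    by_cases hy : y < t
    · cases k with
      | zero => simp [hy]
      | succ k =>
        have hk' : k < r.length := by simpa using hk
        simpa [List.countP_cons, hy] using pv_sorted_lt_iff t r h2 k hk'
    · have hz : (y :: r).countP (fun y => decide (y < t)) = 0 := by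
        apply List.countP_eq_zero.mpr
        intro a ha
        rcases List.mem_cons.mp ha with rfl | ha'
        · simpa using hy
        · have := h1 a ha'
          simp only [decide_eq_true_eq]
          omega
      rw [hz]
      simp only [Nat.not_lt_zero, iff_false]
      have : (y :: r).getD k 0 ∈ y :: r := by
        rw [List.getD_eq_getElem _ _ hk]
        exact List.getElem_mem hk
      rcases List.mem_cons.mp this with he | he
      · rw [he]; exact hy
      · have := h1 _ he
        omega

-- The binary-search loop, started on any bracket of the answer, returns countP (· < t).
theorem pv_ins_eq (ys : List Int) (t : Int) (hs : ys.Pairwise (· ≤ ·)) :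
    ∀ (n lo hi : Nat), hi - lo ≤ n → lo ≤ ys.countP (fun y => decide (y < t)) →
      ys.countP (fun y => decide (y < t)) ≤ hi → hi ≤ ys.length →
      pvInsPoint ys t lo hi = ys.countP (fun y => decide (y < t)) := by
  intro n
  induction n with
  | zero =>
    intro lo hi h1 h2 h3 h4
    rw [pvInsPoint, dif_neg (by omega)]
    omega
  | succ n ih =>
    intro lo hi h1 h2 h3 h4
    rw [pvInsPoint]
    by_cases hlt : lo < hi
    · rw [dif_pos hlt]
      have hmlen : (lo + hi) / 2 < ys.length := by omega
      by_cases hy : ys.getD ((lo + hi) / 2) 0 < t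
      · rw [if_pos hy]
        have hcnt := (pv_sorted_lt_iff t ys hs _ hmlen).mp hy
        exact ih ((lo + hi) / 2 + 1) hi (by omega) (by omega) h3 h4
      · rw [if_neg hy]
        have hcnt : ¬ (lo + hi) / 2 < ys.countP (fun y => decide (y < t)) :=
          fun h => hy ((pv_sorted_lt_iff t ys hs _ hmlen).mpr h)
        exact ih lo ((lo + hi) / 2) (by omega) h2 (by omega) (by omega)
    · rw [dif_neg hlt]
      omega

-- A's fold counts the three zone predicates.
theorem pv_foldA : ∀ (l : List (Int × Int)) (d m a : Int),
    l.foldl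
      (fun (s : Int × Int × Int) p =>
        let y := p.2
        if y < 35 then (s.1 + 1, s.2.1, s.2.2)
        else if y < 70 then (s.1, s.2.1 + 1, s.2.2)
        else (s.1, s.2.1, s.2.2 + 1))
      (d, m, a)
    = (d + (l.countP (fun p => decide (p.2 < 35)) : Int),
       m + (l.countP (fun p => decide (35 ≤ p.2 ∧ p.2 < 70)) : Int),
       a + (l.countP (fun p => decide (70 ≤ p.2)) : Int))
  | [], d, m, a => by simp
  | p :: l, d, m, a => by
    simp only [List.foldl, List.countP_cons]
    rcases lt_or_ge p.2 35 with h1 | h1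
    · rw [if_pos h1, pv_foldA l]
      have e1 : decide (p.2 < 35) = true := by simpa using h1
      have e2 : decide (35 ≤ p.2 ∧ p.2 < 70) = false := by simp; omega
      have e3 : decide (70 ≤ p.2) = false := by simp; omega
      rw [e1, e2, e3]
      simp only [if_true]
      push_cast
      refine Prod.ext (by ring) (Prod.ext (by ring) (by ring))
    · rcases lt_or_ge p.2 70 with h2 | h2
      · rw [if_neg (by omega), if_pos h2, pv_foldA l]
        have e1 : decide (p.2 < 35) = false := by simp; omega
        have e2 : decide (35 ≤ p.2 ∧ p.2 < 70) = true := by simp; omega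
        have e3 : decide (70 ≤ p.2) = false := by simp; omega
        rw [e1, e2, e3]
        simp only [if_true]
        push_cast
        refine Prod.ext (by ring) (Prod.ext (by ring) (by ring))
      · rw [if_neg (by omega), if_neg (by omega), pv_foldA l]
        have e1 : decide (p.2 < 35) = false := by simp; omega
        have e2 : decide (35 ≤ p.2 ∧ p.2 < 70) = false := by simp; omega
        have e3 : decide (70 ≤ p.2) = true := by simpa using h2
        rw [e1, e2, e3]
        simp only [if_true]
        push_cast
        refine Prod.ext (by ring) (Prod.ext (by ring) (by ring))

-- Splitting the < 70 count, and the total, along the 35 / 70 boundaries.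
theorem pv_count_split (l : List (Int × Int)) :
    l.countP (fun p => decide (p.2 < 70))
      = l.countP (fun p => decide (p.2 < 35)) + l.countP (fun p => decide (35 ≤ p.2 ∧ p.2 < 70)) := by
  induction l with
  | nil => rfl
  | cons p l ih =>
    simp only [List.countP_cons, ih, decide_eq_true_eq]
    split_ifs <;> omega

theorem pv_count_total (l : List (Int × Int)) :
    l.length = l.countP (fun p => decide (p.2 < 70)) + l.countP (fun p => decide (70 ≤ p.2)) := by
  induction l with
  | nil => rfl
  | cons p l ih =>
    simp only [List.countP_cons, List.length_cons, ih, decide_eq_true_eq]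
    split_ifs <;> omega

-- ===== VERDICT (by name: the statement is the Claim_ definition above) =====
theorem get_formation_binned_py_spec : Claim_equal_get_formation_binned_py := by
  intro positions _
  unfold Spec_get_formation_binned_py get_formation_binned_py get_formation_binned_py_alt
  set ys := PySem.List.sorted (positions.map (fun p => p.2)) (fun y => y) false with hys
  have hsorted : ys.Pairwise (· ≤ ·) := by
    simpa using PySem.List.sorted_pairwise (xs := positions.map (fun p => p.2)) (key := fun y => y)
  have hperm : ys.Perm (positions.map (fun p => p.2)) := PySem.List.sorted_perm _ _ _
  have hcnt : ∀ t : Int, ys.countP (fun y => decide (y < t)) = positions.countP (fun p => decide (p.2 < t)) := by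
    intro t
    rw [hperm.countP_eq, List.countP_map]
    rfl
  have hlen : ys.length = positions.length := by
    rw [hperm.length_eq, List.length_map]
  have hi : pvInsPoint ys 35 0 ys.length = positions.countP (fun p => decide (p.2 < 35)) := by
    rw [pv_ins_eq ys 35 hsorted ys.length 0 ys.length (by omega) (by omega)
      List.countP_le_length (le_refl _), hcnt]
  have hj : pvInsPoint ys 70 0 ys.length = positions.countP (fun p => decide (p.2 < 70)) := by
    rw [pv_ins_eq ys 70 hsorted ys.length 0 ys.length (by omega) (by omega)
      List.countP_le_length (le_refl _), hcnt]
  rw [pv_foldA]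
  simp only [zero_add]
  rw [hi, hj, hlen]
  have e1 : ((positions.countP (fun p => decide (35 ≤ p.2 ∧ p.2 < 70)) : Int))
      = (positions.countP (fun p => decide (p.2 < 70)) : Int)
        - (positions.countP (fun p => decide (p.2 < 35)) : Int) := by
    have := pv_count_split positions; omega
  have e2 : ((positions.countP (fun p => decide (70 ≤ p.2)) : Int))
      = (positions.length : Int) - (positions.countP (fun p => decide (p.2 < 70)) : Int) := by
    have := pv_count_total positions; omega
  rw [e1, e2]
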